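-- pv_equiv track=rewrite | github.com/MyskYko/qbf_abc | python_src/gen_cnf.py | identify_var
-- ===== SOURCE A (Python) =====
-- def identify_var(init_assign, fin_assign):
--     var_id = {}
--     id_var = {}
--     num_var = 0
--     init_assign_id = []
--     fin_assign_id = []
--
--     for row in init_assign:
--         init_assign_id_row = []
--         for elem in row:
--             if elem not in var_id:
--                 var_id[elem] = num_var
--                 id_var[num_var] = elem
--                 num_var += 1
--             init_assign_id_row.append(var_id[elem])
--         init_assign_id.append(init_assign_id_row)
--
--     for row in fin_assign:
--         fin_assign_id_row = []
--         for elem in row: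
--             fin_assign_id_row.append(var_id[elem])
--         fin_assign_id.append(fin_assign_id_row)
--
--     return num_var, var_id, id_var, init_assign_id, fin_assign_id
-- ===== SOURCE B (Python) =====
-- def identify_var(init_assign, fin_assign):
--     order = list(dict.fromkeys(e for row in init_assign for e in row))
--     var_id = {e: i for i, e in enumerate(order)}
--     id_var = {i: e for i, e in enumerate(order)}
--     init_assign_id = [[var_id[e] for e in row] for row in init_assign]
--     fin_assign_id = [[var_id[e] for e in row] for row in fin_assign]
--     return len(order), var_id, id_var, init_assign_id, fin_assign_id
-- ===== Notes on version B (the rewrite author's own statement) =====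
-- stated objective: simpler
-- what changed: Instead of one interleaved loop that builds the dicts while translating init_assign, B first computes the first-seen-ordered distinct elements (dict.fromkeys) and enumerates them into var_id/id_var, then remaps both matrices with the same uniform comprehension.
import Mathlib
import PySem

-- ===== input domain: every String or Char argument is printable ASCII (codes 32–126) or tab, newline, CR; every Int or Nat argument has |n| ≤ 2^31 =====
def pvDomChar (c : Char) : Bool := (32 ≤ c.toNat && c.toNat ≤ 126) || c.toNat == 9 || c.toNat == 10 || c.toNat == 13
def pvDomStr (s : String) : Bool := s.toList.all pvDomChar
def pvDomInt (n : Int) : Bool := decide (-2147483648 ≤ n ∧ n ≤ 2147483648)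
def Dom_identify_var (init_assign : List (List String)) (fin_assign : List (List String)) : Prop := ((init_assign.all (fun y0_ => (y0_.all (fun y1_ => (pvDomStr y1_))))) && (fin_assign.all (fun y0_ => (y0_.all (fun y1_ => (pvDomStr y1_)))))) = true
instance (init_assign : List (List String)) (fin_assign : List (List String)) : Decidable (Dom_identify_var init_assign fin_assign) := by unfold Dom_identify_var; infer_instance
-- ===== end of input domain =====

-- B builds the first-seen index (dedup + enumerate) once and then remaps both matrices
-- with the same uniform map, instead of A's interleaved build-and-translate loop (objective: simpler).


-- ===== PORT A =====
-- inner loop body: "if elem not in var_id: …; row.append(var_id[elem])"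
-- state = (var_id, id_var, num_var, current row of ids)
def aStep (st : PySem.Dict String Int × PySem.Dict Int String × Int × List Int)
    (elem : String) : PySem.Dict String Int × PySem.Dict Int String × Int × List Int :=
  if st.1.contains elem then
    -- var_id[elem]; getD 0 is exact here: Pre_ excludes the KeyError inputs
    (st.1, st.2.1, st.2.2.1, st.2.2.2 ++ [st.1.getD elem 0])
  else
    (st.1.insert elem st.2.2.1, st.2.1.insert st.2.2.1 elem, st.2.2.1 + 1,
      st.2.2.2 ++ [st.2.2.1])

-- outer loop body over init_assign rows
def aRow (st : PySem.Dict String Int × PySem.Dict Int String × Int × List (List Int))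
    (row : List String) : PySem.Dict String Int × PySem.Dict Int String × Int × List (List Int) :=
  let r := row.foldl aStep (st.1, st.2.1, st.2.2.1, [])
  (r.1, r.2.1, r.2.2.1, st.2.2.2 ++ [r.2.2.2])

def identify_var (init_assign : List (List String)) (fin_assign : List (List String)) :
    Int × (List (String × Int)) × (List (Int × String)) × List (List Int) × List (List Int) :=
  let r := init_assign.foldl aRow (PySem.Dict.empty, PySem.Dict.empty, 0, [])
  -- second loop: fin_assign_id_row.append(var_id[elem]); getD 0 exact under Pre_
  let fin_id := fin_assign.foldl
    (fun acc row => acc ++ [row.foldl (fun racc elem => racc ++ [r.1.getD elem 0]) []]) []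
  (r.2.2.1, r.1.items, r.2.1.items, r.2.2.2, fin_id)

-- ===== PORT B =====
-- var_id[e] as the first-match association-list lookup; getD 0 is exact under Pre_ (no KeyError)
def bLookup (m : List (String × Int)) (e : String) : Int :=
  ((m.find? (fun p => p.1 == e)).map (fun p => p.2)).getD 0

def identify_var_alt (init_assign : List (List String)) (fin_assign : List (List String)) :
    Int × (List (String × Int)) × (List (Int × String)) × List (List Int) × List (List Int) :=
  let order := PySem.List.dedup init_assign.flatten
  let var_id : List (String × Int) := order.zipIdx.map (fun p => (p.1, (p.2 : Int)))
  let id_var : List (Int × String) := order.zipIdx.map (fun p => ((p.2 : Int), p.1))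
  let init_assign_id := init_assign.map (fun row => row.map (bLookup var_id))
  let fin_assign_id := fin_assign.map (fun row => row.map (bLookup var_id))
  ((order.length : Int), var_id, id_var, init_assign_id, fin_assign_id)

-- ===== PRECONDITION & SPEC =====
-- Pre_ excludes exactly the inputs where fin_assign contains an element never seen in
-- init_assign: there Python A raises KeyError (and B raises KeyError too).
def Pre_identify_var (init_assign : List (List String)) (fin_assign : List (List String)) : Prop :=
  ∀ row ∈ fin_assign, ∀ e ∈ row, e ∈ init_assign.flatten
instance (init_assign : List (List String)) (fin_assign : List (List String)) : Decidable (Pre_identify_var init_assign fin_assign) := by unfold Pre_identify_var; infer_instance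

def pvWitness_identify_var : List (List String) × List (List String) :=
  ([["a", "b"], ["a", "c"]], [["c", "b", "a"]])

def Spec_identify_var (init_assign : List (List String)) (fin_assign : List (List String)) (out : Int × (List (String × Int)) × (List (Int × String)) × List (List Int) × List (List Int)) : Prop := out = identify_var_alt init_assign fin_assign
instance (init_assign : List (List String)) (fin_assign : List (List String)) (out : Int × (List (String × Int)) × (List (Int × String)) × List (List Int) × List (List Int)) : Decidable (Spec_identify_var init_assign fin_assign out) := by unfold Spec_identify_var; infer_instance

-- ===== CLAIM (what is proved, stated in full; the proofs are below) =====
def Claim_equal_identify_var : Prop := ∀ (init_assign : List (List String)) (fin_assign : List (List String)), Dom_identify_var init_assign fin_assign → Pre_identify_var init_assign fin_assign → Spec_identify_var init_assign fin_assign (identify_var init_assign fin_assign)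

-- ===== LEMMAS AND PROOFS =====

-- the dictionaries A maintains, as a function of the list s of first-seen distinct elements
def toVD (s : List String) : PySem.Dict String Int :=
  ⟨s.zipIdx.map (fun p => (p.1, (p.2 : Int)))⟩
def toIV (s : List String) : PySem.Dict Int String :=
  ⟨s.zipIdx.map (fun p => ((p.2 : Int), p.1))⟩

theorem find_toVD (s : List String) (e : String) (k : Nat) :
    ((s.zipIdx k).map (fun p => (p.1, (p.2 : Int)))).find? (fun p => p.1 == e)
      = if e ∈ s then some (e, ((k + s.idxOf e : Nat) : Int)) else none := by
  induction s generalizing k with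
  | nil => simp
  | cons a t ih =>
    simp only [List.zipIdx_cons, List.map_cons, List.find?_cons]
    by_cases h : a = e
    · subst h; simp
    · have hb : (a == e) = false := by simp [h]
      simp only [hb, ih (k+1), List.idxOf_cons, List.mem_cons]
      by_cases he : e ∈ t
      · simp only [he, if_true, cond_false]
        have hh : k + 1 + List.idxOf e t = k + (List.idxOf e t + 1) := by omega
        rw [hh]; simp
      · simp [he, Ne.symm h]

theorem contains_toVD (s : List String) (e : String) :
    (toVD s).contains e = decide (e ∈ s) := by
  rw [PySem.Dict.contains_eq_isSome_get?]
  simp only [PySem.Dict.get?, toVD, find_toVD]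
  by_cases he : e ∈ s <;> simp [he]

theorem getD_toVD (s : List String) (e : String) (h : e ∈ s) :
    (toVD s).getD e 0 = (s.idxOf e : Int) := by
  have hf := find_toVD s e 0
  simp only [PySem.Dict.getD, PySem.Dict.get?, toVD]
  rw [hf]
  simp [h]

theorem insert_toVD (s : List String) (e : String) (h : e ∉ s) :
    (toVD s).insert e (s.length : Int) = toVD (s ++ [e]) := by
  have hc : (toVD s).contains e = false := by simp [contains_toVD, h]
  simp only [PySem.Dict.insert, hc, Bool.false_eq_true, if_false]
  unfold toVD
  rw [List.zipIdx_append]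
  simp

theorem insert_toIV (s : List String) (e : String) :
    (toIV s).insert (s.length : Int) e = toIV (s ++ [e]) := by
  have hc : (toIV s).contains ((s.length : Nat) : Int) = false := by
    simp only [PySem.Dict.contains, toIV, List.any_map, List.any_eq_false, Function.comp]
    rintro ⟨a, i⟩ hp
    have hi := (List.mem_zipIdx hp).2.1
    simp only [beq_iff_eq]
    intro hcast
    have : i = s.length := by exact_mod_cast hcast
    omega
  simp only [PySem.Dict.insert, hc, Bool.false_eq_true, if_false]
  unfold toIV
  rw [List.zipIdx_append]
  simp

theorem idxOf_prefix {s t : List String} (h : s <+: t) (e : String) (he : e ∈ s) :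
    t.idxOf e = s.idxOf e := by
  obtain ⟨u, rfl⟩ := h
  rw [List.idxOf_append, if_pos he]

theorem prefix_update (s : List String) (r : List String) :
    s <+: PySem.Set.update s r := by
  induction r generalizing s with
  | nil => simp [PySem.Set.update]
  | cons x r ih =>
    have h1 : s <+: PySem.Set.add s x := by
      unfold PySem.Set.add
      split
      · exact List.prefix_rfl
      · exact List.prefix_append s [x]
    exact h1.trans (by simpa [PySem.Set.update] using ih (PySem.Set.add s x))

theorem mem_update_of_mem (s : List String) (r : List String) (e : String) (h : e ∈ r) :
    e ∈ PySem.Set.update s r := by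
  induction r generalizing s with
  | nil => simp at h
  | cons x r ih =>
    rcases List.mem_cons.mp h with rfl | hr
    · have hx : e ∈ PySem.Set.add s e := (PySem.Set.mem_add s e e).mpr (Or.inr rfl)
      have hpre := prefix_update (PySem.Set.add s e) r
      have : e ∈ PySem.Set.update (PySem.Set.add s e) r := hpre.subset hx
      simpa [PySem.Set.update] using this
    · have := ih (PySem.Set.add s x) hr
      simpa [PySem.Set.update] using this

theorem inner_loop (r : List String) (s : List String) (racc : List Int) :
    r.foldl aStep (toVD s, toIV s, (s.length : Int), racc)
      = (toVD (PySem.Set.update s r), toIV (PySem.Set.update s r),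
         ((PySem.Set.update s r).length : Int),
         racc ++ r.map (fun e => ((PySem.Set.update s r).idxOf e : Int))) := by
  induction r generalizing s racc with
  | nil => simp [PySem.Set.update]
  | cons e r ih =>
    have hupd : PySem.Set.update s (e :: r) = PySem.Set.update (PySem.Set.add s e) r := by
      simp [PySem.Set.update]
    by_cases hc : e ∈ s
    · have hadd : PySem.Set.add s e = s := by
        simp [PySem.Set.add, List.contains_eq_mem, hc]
      have hstep : aStep (toVD s, toIV s, (s.length : Int), racc) e
          = (toVD s, toIV s, (s.length : Int), racc ++ [(s.idxOf e : Int)]) := by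
        simp [aStep, contains_toVD, hc, getD_toVD s e hc]
      rw [List.foldl_cons, hstep, ih s (racc ++ [(s.idxOf e : Int)]), hupd, hadd]
      have hidx : ((PySem.Set.update s r).idxOf e : Int) = (s.idxOf e : Int) := by
        rw [idxOf_prefix (prefix_update s r) e hc]
      simp [hidx, List.map_cons]
    · have hadd : PySem.Set.add s e = s ++ [e] := by
        simp [PySem.Set.add, List.contains_eq_mem, hc]
      have hstep : aStep (toVD s, toIV s, (s.length : Int), racc) e
          = (toVD (s ++ [e]), toIV (s ++ [e]), ((s ++ [e]).length : Int),
             racc ++ [(s.length : Int)]) := by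
        simp only [aStep, contains_toVD s e]
        rw [if_neg (by simp [hc])]
        rw [insert_toVD s e hc, insert_toIV s e]
        simp
      rw [List.foldl_cons, hstep, ih (s ++ [e]) (racc ++ [(s.length : Int)]), hupd, hadd]
      have he1 : e ∈ s ++ [e] := by simp
      have hidx : ((PySem.Set.update (s ++ [e]) r).idxOf e : Int) = (s.length : Int) := by
        rw [idxOf_prefix (prefix_update (s ++ [e]) r) e he1]
        rw [List.idxOf_append, if_neg hc]
        simp
      simp [hidx, List.map_cons]

theorem outer_loop (rows : List (List String)) (s : List String) (acc : List (List Int)) :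
    rows.foldl aRow (toVD s, toIV s, (s.length : Int), acc)
      = (toVD (PySem.Set.update s rows.flatten), toIV (PySem.Set.update s rows.flatten),
         ((PySem.Set.update s rows.flatten).length : Int),
         acc ++ rows.map (fun row => row.map
           (fun e => ((PySem.Set.update s rows.flatten).idxOf e : Int)))) := by
  induction rows generalizing s acc with
  | nil => simp [PySem.Set.update]
  | cons row rows ih =>
    have hrow : aRow (toVD s, toIV s, (s.length : Int), acc) row
        = (toVD (PySem.Set.update s row), toIV (PySem.Set.update s row),
           ((PySem.Set.update s row).length : Int),
           acc ++ [row.map (fun e => ((PySem.Set.update s row).idxOf e : Int))]) := by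
      simp only [aRow, inner_loop row s []]
      simp
    have hflat : PySem.Set.update s (row :: rows).flatten
        = PySem.Set.update (PySem.Set.update s row) rows.flatten := by
      simp [PySem.Set.update, List.flatten_cons, List.foldl_append]
    rw [List.foldl_cons, hrow,
      ih (PySem.Set.update s row) (acc ++ [row.map (fun e => ((PySem.Set.update s row).idxOf e : Int))]),
      ← hflat]
    have hmap : row.map (fun e => ((PySem.Set.update s row).idxOf e : Int))
        = row.map (fun e => ((PySem.Set.update s (row :: rows).flatten).idxOf e : Int)) := by
      apply List.map_congr_left
      intro e he
      have hmem : e ∈ PySem.Set.update s row := mem_update_of_mem s row e he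
      have hpre : PySem.Set.update s row <+: PySem.Set.update s (row :: rows).flatten := by
        rw [hflat]; exact prefix_update _ _
      rw [idxOf_prefix hpre e hmem]
    simp [hmap, List.map_cons]

theorem bLookup_toVD (s : List String) (e : String) :
    bLookup ((toVD s).items) e = (toVD s).getD e 0 := by
  rfl

-- ===== VERDICT (by name: the statement is the Claim_ definition above) =====
theorem identify_var_spec : Claim_equal_identify_var := by
  intro init fin _ _
  unfold Spec_identify_var identify_var identify_var_alt
  have h0 : ((PySem.Dict.empty : PySem.Dict String Int), (PySem.Dict.empty : PySem.Dict Int String), (0 : Int), ([] : List (List Int)))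
      = (toVD [], toIV [], (([] : List String).length : Int), ([] : List (List Int))) := by
    simp [toVD, toIV, PySem.Dict.empty]
  have hO : PySem.Set.update [] init.flatten = PySem.List.dedup init.flatten := by
    simp [PySem.Set.update, PySem.List.dedup, PySem.Set.ofList, PySem.Set.empty]
  rw [h0, outer_loop init [] [], hO]
  set O := PySem.List.dedup init.flatten with hOdef
  have hmemO : ∀ e, e ∈ init.flatten → e ∈ O := by
    intro e he
    exact (PySem.Set.mem_ofList init.flatten e).mpr he
  have hvar : (toVD O).items = O.zipIdx.map (fun p => (p.1, (p.2 : Int))) := rfl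
  have hlk : ∀ e ∈ init.flatten,
      ((O.idxOf e : Nat) : Int) = bLookup (O.zipIdx.map (fun p => (p.1, (p.2 : Int)))) e := by
    intro e he
    rw [← hvar, bLookup_toVD, getD_toVD O e (hmemO e he)]
  simp only [Prod.mk.injEq]
  refine ⟨trivial, rfl, rfl, ?_, ?_⟩
  · simp only [List.nil_append]
    apply List.map_congr_left
    intro row hrow
    apply List.map_congr_left
    intro e he
    exact hlk e (List.mem_flatten.mpr ⟨row, hrow, he⟩)
  · rw [PySem.List.foldl_append_singleton_eq_map]
    simp only [List.nil_append]
    apply List.map_congr_left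
    intro row hrow
    rw [PySem.List.foldl_append_singleton_eq_map]
    simp only [List.nil_append]
    apply List.map_congr_left
    intro e he
    rw [← hvar, bLookup_toVD]
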